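-- pv_equiv track=rewrite | github.com/astroschoolbaba9/ASB_Report | numerology/features/special_numbers.py | _paired_or_equal
-- ===== SOURCE A (Python) =====
-- from typing import Dict, Any, List, Tuple, Optional
--
-- _PAIR_GROUPS = [
--     {1, 6},
--     {2, 7},
--     {3, 8},
--     {4, 9},
-- ]
--
-- def _paired_or_equal(x: Optional[int], y: Optional[int]) -> bool:
--     """True if x==y OR {x,y} is one of the pairing groups."""
--     if x is None or y is None:
--         return False
--     x = int(x)
--     y = int(y)
--     if x == y:
--         return True
--     return any({x, y} == g for g in _PAIR_GROUPS)
-- ===== SOURCE B (Python) =====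
-- def _canon(n):
--     """Canonical representative of n's pairing class: 6..9 map down to 1..4."""
--     return n - 5 if 6 <= n <= 9 else n
--
-- def _paired_or_equal(x, y):
--     """True iff both present and x, y lie in the same pairing class (equal or a pairing group)."""
--     if x is None or y is None:
--         return False
--     return _canon(int(x)) == _canon(int(y))
-- ===== Notes on version B (the rewrite author's own statement) =====
-- stated objective: simpler
-- what changed: Instead of an equality branch plus a scan over the list of pairing-group sets, B canonicalises each value to a class representative (n-5 for n in 6..9, else n) and returns equality of the two canonical forms; there is no x==y branch and no pair table or pair test.
import Mathlib
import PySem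

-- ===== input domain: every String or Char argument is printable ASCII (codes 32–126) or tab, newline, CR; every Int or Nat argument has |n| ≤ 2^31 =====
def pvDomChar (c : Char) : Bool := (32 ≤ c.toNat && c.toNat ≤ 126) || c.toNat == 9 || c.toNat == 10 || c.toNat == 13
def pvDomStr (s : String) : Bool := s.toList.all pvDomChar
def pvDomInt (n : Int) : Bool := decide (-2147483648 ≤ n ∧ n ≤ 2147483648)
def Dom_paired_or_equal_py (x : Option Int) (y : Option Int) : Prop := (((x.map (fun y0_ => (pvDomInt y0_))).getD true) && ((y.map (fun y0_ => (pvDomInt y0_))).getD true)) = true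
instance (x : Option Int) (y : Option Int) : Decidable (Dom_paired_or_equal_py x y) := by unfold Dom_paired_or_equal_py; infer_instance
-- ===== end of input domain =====

-- B replaces A's equality-branch + pairing-group scan with canonicalisation: each value is mapped to a class representative and the representatives are compared (simpler; no branch, no pair table).


-- ===== PORT A =====
-- _PAIR_GROUPS = [{1,6},{2,7},{3,8},{4,9}]
def pairGroups : List (PySem.Set Int) :=
  [PySem.Set.ofList [1, 6], PySem.Set.ofList [2, 7], PySem.Set.ofList [3, 8], PySem.Set.ofList [4, 9]]

def paired_or_equal_py (x : Option Int) (y : Option Int) : Bool :=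
  match x, y with
  | none, _ => false
  | _, none => false
  | some xv, some yv =>
    if xv = yv then true
    else pairGroups.any (fun g => PySem.Set.equal (PySem.Set.ofList [xv, yv]) g)

-- ===== PORT B =====
-- canonical representative of n's pairing class: 6..9 map down to 1..4
def canonInt (n : Int) : Int := if 6 ≤ n ∧ n ≤ 9 then n - 5 else n

def paired_or_equal_py_alt (x : Option Int) (y : Option Int) : Bool :=
  match x, y with
  | none, _ => false
  | _, none => false
  | some xv, some yv => decide (canonInt xv = canonInt yv)

-- ===== PRECONDITION & SPEC =====
def Spec_paired_or_equal_py (x : Option Int) (y : Option Int) (out : Bool) : Prop := out = paired_or_equal_py_alt x y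
instance (x : Option Int) (y : Option Int) (out : Bool) : Decidable (Spec_paired_or_equal_py x y out) := by unfold Spec_paired_or_equal_py; infer_instance

-- ===== CLAIM =====
def Claim_equal_paired_or_equal_py : Prop := ∀ (x : Option Int) (y : Option Int), Dom_paired_or_equal_py x y → Spec_paired_or_equal_py x y (paired_or_equal_py x y)

-- ===== LEMMAS AND PROOFS =====
theorem set_equal_pair (a b c d : Int) (h : a ≠ b) (h2 : c ≠ d) :
    PySem.Set.equal (PySem.Set.ofList [a, b]) (PySem.Set.ofList [c, d]) =
      decide (a = c ∧ b = d ∨ a = d ∧ b = c) := by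
  simp [PySem.Set.ofList_eq_foldl, PySem.Set.add, PySem.Set.contains,
    PySem.Set.equal, PySem.Set.issubset, Ne.symm h, Ne.symm h2]
  rw [Bool.eq_iff_iff]
  constructor <;> intro hh <;> simp_all <;> tauto

-- ===== VERDICT =====
theorem paired_or_equal_py_spec : Claim_equal_paired_or_equal_py := by
  intro x y _
  unfold Spec_paired_or_equal_py paired_or_equal_py paired_or_equal_py_alt
  match x, y with
  | none, _ => rfl
  | some _, none => rfl
  | some xv, some yv =>
    by_cases h : xv = yv
    · simp [h]
    · simp only [if_neg h, pairGroups, List.any_cons, List.any_nil,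
        set_equal_pair xv yv 1 6 h (by decide), set_equal_pair xv yv 2 7 h (by decide),
        set_equal_pair xv yv 3 8 h (by decide), set_equal_pair xv yv 4 9 h (by decide),
        Bool.or_false]
      rw [Bool.eq_iff_iff]
      simp only [Bool.or_eq_true, decide_eq_true_eq, canonInt]
      split_ifs <;> omega
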